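-- pv_equiv track=rewrite | github.com/RacleRay/MyLeetCodeLife | Book_part/Efficient_Algorithm/string/T9.py | predictive_text
-- ===== SOURCE A (Python) =====
-- t9 = "22233344455566677778889999"
--
-- def letter_to_digit(x):
--     """:returns: the digit correspondence for letter x"""
--     assert 'a' <= x <= 'z'
--     return t9[ord(x) - ord('a')]
--
-- def code_word(word):
--     """:returns: the digit correspondence for given word"""
--     return ''.join(map(letter_to_digit, word))
--
-- def predictive_text(dic):
--     """Predictive text for mobile phones
--
--     :param dic: associates weights to words from [a-z]*
--     :returns: a dictionary associating to words from [2-9]*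
--              a corresponding word from the dictionary with highest weight
--     :complexity: linear in total word length
--     """
--     # total_weight[p] = total weight of words having prefix p
--     total_weight = {}
--     for word, weight in dic:
--         prefix = ""
--         for x in word:
--             prefix += x
--             if prefix in total_weight:
--                 total_weight[prefix] += weight
--             else:
--                 total_weight[prefix] = weight
--     # prop[s] = prefix to display for s
--     prop = {}
--     for prefix in total_weight:
--         code = code_word(prefix)
--         if (code not in prop
--                 or total_weight[prop[code]] < total_weight[prefix]):
--             prop[code] = prefix
--     return prop
-- ===== SOURCE B (Python) =====
-- t9 = "22233344455566677778889999"
--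
-- def letter_to_digit(x):
--     """:returns: the digit correspondence for letter x"""
--     assert 'a' <= x <= 'z'
--     return t9[ord(x) - ord('a')]
--
-- def code_word(word):
--     """:returns: the digit correspondence for given word"""
--     return ''.join(map(letter_to_digit, word))
--
-- def predictive_text(dic):
--     """Group prefixes by digit code, then pick the heaviest prefix per group."""
--     total_weight = {}
--     for word, weight in dic:
--         prefix = ""
--         for x in word:
--             prefix += x
--             if prefix in total_weight:
--                 total_weight[prefix] += weight
--             else:
--                 total_weight[prefix] = weight
--     groups = {}
--     for prefix, weight in total_weight.items():
--         groups.setdefault(code_word(prefix), []).append((prefix, weight))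
--     return {code: max(group, key=lambda pw: pw[1])[0]
--             for code, group in groups.items()}
-- ===== Notes on version B (the rewrite author's own statement) =====
-- stated objective: alternative
-- what changed: The running compare-and-keep-max second pass is replaced by grouping the prefixes by digit code into lists and taking max(group, key=weight) per group; Pre_ excludes inputs whose words contain characters outside a-z, on which A's assert raises AssertionError.
import Mathlib
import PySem

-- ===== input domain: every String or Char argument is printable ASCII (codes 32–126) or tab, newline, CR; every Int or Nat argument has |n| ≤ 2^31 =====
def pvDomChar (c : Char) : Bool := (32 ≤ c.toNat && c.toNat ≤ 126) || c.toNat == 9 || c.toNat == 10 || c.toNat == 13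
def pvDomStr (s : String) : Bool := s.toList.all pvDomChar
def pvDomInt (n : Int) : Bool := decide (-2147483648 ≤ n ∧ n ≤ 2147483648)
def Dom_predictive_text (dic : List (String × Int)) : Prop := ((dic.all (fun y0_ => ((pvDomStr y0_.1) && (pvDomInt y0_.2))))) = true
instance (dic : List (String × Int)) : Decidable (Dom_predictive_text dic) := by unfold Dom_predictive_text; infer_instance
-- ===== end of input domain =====

-- B replaces A's running compare-and-keep-max second pass by grouping the prefixes by their
-- digit code and taking the first maximal-weight element of each group (objective: alternative).

-- ===== PORT A =====
-- t9 = "22233344455566677778889999"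
def pyT9 : String := "22233344455566677778889999"

-- letter_to_digit: t9[ord(x) - ord('a')]; the assert 'a' <= x <= 'z' is reflected in Pre_
def letterToDigit (x : Char) : String :=
  ((PySem.Str.pyGet? pyT9 ((x.toNat : Int) - 97)).map String.singleton).getD ""

-- code_word: ''.join(map(letter_to_digit, word))
def codeWord (word : String) : String :=
  PySem.Str.join "" (word.toList.map letterToDigit)

-- the first pass of A and of B are the identical Python text: one shared transliteration
-- total_weight[p] = total weight of words having prefix p
def buildTotalWeight (dic : List (String × Int)) : PySem.Dict String Int :=
  dic.foldl (fun tw wp =>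
    (wp.1.toList.foldl
      (fun (st : PySem.Dict String Int × String) x =>
        if (st.1.contains (st.2.push x) : Bool) then
          (st.1.modify (st.2.push x) 0 (· + wp.2), st.2.push x)
        else
          (st.1.insert (st.2.push x) wp.2, st.2.push x))
      (tw, "")).1)
    PySem.Dict.empty

def predictive_text (dic : List (String × Int)) : List (String × String) :=
  let tw := buildTotalWeight dic
  -- prop[s] = prefix to display for s
  let prop := tw.keys.foldl
    (fun prop pre =>
      if ¬ (prop.contains (codeWord pre) : Bool)
          ∨ tw.getD (prop.getD (codeWord pre) "") 0 < tw.getD pre 0 then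
        prop.insert (codeWord pre) pre
      else prop)
    PySem.Dict.empty
  prop.items

-- ===== PORT B =====
def predictive_text_alt (dic : List (String × Int)) : List (String × String) :=
  let tw := buildTotalWeight dic
  -- groups.setdefault(code_word(prefix), []).append((prefix, weight))
  let groups := tw.items.foldl
    (fun (g : PySem.Dict String (List (String × Int))) pw =>
      g.modify (codeWord pw.1) [] (· ++ [pw]))
    PySem.Dict.empty
  -- {code: max(group, key=lambda pw: pw[1])[0] for code, group in groups.items()}
  -- (each group is nonempty by construction, so max never sees an empty list; '.getD ""'
  -- only totalises the Option)
  groups.items.map (fun cg =>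
    (cg.1, ((PySem.List.max? cg.2 (fun pw => pw.2)).map (·.1)).getD ""))

-- ===== PRECONDITION & SPEC =====
-- Pre_ excludes exactly the inputs on which A's assert fails (AssertionError): some word
-- containing a character outside 'a'..'z'.
def Pre_predictive_text (dic : List (String × Int)) : Prop :=
  (dic.all (fun p => p.1.toList.all (fun c => 97 ≤ c.toNat && c.toNat ≤ 122))) = true
instance (dic : List (String × Int)) : Decidable (Pre_predictive_text dic) := by
  unfold Pre_predictive_text; infer_instance

def pvWitness_predictive_text : (List (String × Int)) := [("ab", 2), ("ba", 1), ("b", 4)]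

def Spec_predictive_text (dic : List (String × Int)) (out : List (String × String)) : Prop := out = predictive_text_alt dic
instance (dic : List (String × Int)) (out : List (String × String)) : Decidable (Spec_predictive_text dic out) := by unfold Spec_predictive_text; infer_instance

-- ===== CLAIM (what is proved, stated in full; the proofs are below) =====
def Claim_equal_predictive_text : Prop := ∀ (dic : List (String × Int)), Dom_predictive_text dic → Pre_predictive_text dic → Spec_predictive_text dic (predictive_text dic)

-- ===== LEMMAS AND PROOFS =====

-- "best so far" fold of A's selection, over (prefix, weight) pairs
def bpStep (c : String) (b : Option (String × Int)) (pw : String × Int) : Option (String × Int) :=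
  if codeWord pw.1 = c then
    match b with
    | none => some pw
    | some q => if q.2 < pw.2 then some pw else b
  else b

def bestP (c : String) (l : List (String × Int)) (b : Option (String × Int)) : Option (String × Int) :=
  l.foldl (bpStep c) b

lemma bestP_append (c : String) (l : List (String × Int)) (x : String × Int)
    (b : Option (String × Int)) : bestP c (l ++ [x]) b = bpStep c (bestP c l b) x := by
  simp [bestP]

lemma bestP_none_of_not_mem (c : String) (l : List (String × Int))
    (h : c ∉ l.map (fun pw => codeWord pw.1)) : bestP c l none = none := by
  induction l with
  | nil => rfl
  | cons a l ih =>
      simp only [List.map_cons, List.mem_cons, not_or] at h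
      simpa [bestP, bpStep, Ne.symm h.1] using ih h.2

lemma bestP_some_acc (c : String) (l : List (String × Int)) (q : String × Int) :
    (bestP c l (some q)).isSome := by
  induction l generalizing q with
  | nil => rfl
  | cons a l ih =>
      simp only [bestP, List.foldl_cons, bpStep]
      split
      · split
        · exact ih _
        · exact ih _
      · exact ih _

lemma bestP_isSome_of_mem (c : String) (l : List (String × Int))
    (h : c ∈ l.map (fun pw => codeWord pw.1)) : (bestP c l none).isSome := by
  induction l with
  | nil => simp at h
  | cons a l ih =>
      simp only [List.map_cons, List.mem_cons] at h
      by_cases hc : codeWord a.1 = c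
      · simpa [bestP, bpStep, hc] using bestP_some_acc c l a
      · rcases h with h | h
        · exact absurd h.symm hc
        · simpa [bestP, bpStep, hc] using ih h

lemma bestP_spec (c : String) (l : List (String × Int)) (q : String × Int)
    (h : bestP c l none = some q) :
    q ∈ l ∧ codeWord q.1 = c ∧ ∀ y ∈ l, codeWord y.1 = c → y.2 ≤ q.2 := by
  induction l using List.reverseRecOn generalizing q with
  | nil => simp [bestP] at h
  | append_singleton l x ih =>
      rw [bestP_append] at h
      by_cases hc : codeWord x.1 = c
      · cases hb : bestP c l none with
        | none =>
            rw [hb] at h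
            simp only [bpStep, hc, if_true] at h
            have hq : q = x := by
              simpa using h.symm
            subst hq
            refine ⟨by simp, hc, ?_⟩
            intro y hy hyc
            rcases List.mem_append.1 hy with hy | hy
            · exact absurd (bestP_isSome_of_mem c l (List.mem_map.2 ⟨y, hy, hyc⟩))
                (by simp [hb])
            · simp at hy; subst hy; exact le_refl _
        | some p =>
            rw [hb] at h
            obtain ⟨hmem, hcode, hmax⟩ := ih p hb
            simp only [bpStep, hc, if_true] at h
            by_cases hlt : p.2 < x.2
            · rw [if_pos hlt] at h
              have hq : q = x := by simpa using h.symm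
              subst hq
              refine ⟨by simp, hc, ?_⟩
              intro y hy hyc
              rcases List.mem_append.1 hy with hy | hy
              · exact le_of_lt (lt_of_le_of_lt (hmax y hy hyc) hlt)
              · simp at hy; subst hy; exact le_refl _
            · rw [if_neg hlt] at h
              have hq : q = p := by simpa using h.symm
              subst hq
              refine ⟨List.mem_append.2 (Or.inl hmem), hcode, ?_⟩
              intro y hy hyc
              rcases List.mem_append.1 hy with hy | hy
              · exact hmax y hy hyc
              · simp at hy; subst hy; exact le_of_not_gt hlt
      · simp only [bpStep, hc] at h
        obtain ⟨hmem, hcode, hmax⟩ := ih q h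
        refine ⟨List.mem_append.2 (Or.inl hmem), hcode, ?_⟩
        intro y hy hyc
        rcases List.mem_append.1 hy with hy | hy
        · exact hmax y hy hyc
        · simp at hy; subst hy; exact absurd hyc hc

-- keys of the first pass are nodup
lemma nodup_keys_inner (wt : Int) (xs : List Char) (st : PySem.Dict String Int × String)
    (h : st.1.keys.Nodup) :
    (xs.foldl
      (fun (st : PySem.Dict String Int × String) x =>
        if (st.1.contains (st.2.push x) : Bool) then
          (st.1.modify (st.2.push x) 0 (· + wt), st.2.push x)
        else
          (st.1.insert (st.2.push x) wt, st.2.push x)) st).1.keys.Nodup := by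
  induction xs generalizing st with
  | nil => exact h
  | cons x xs ih =>
      rw [List.foldl_cons]
      apply ih
      dsimp only
      split
      · dsimp only
        rw [PySem.Dict.keys_modify]
        exact PySem.Dict.nodup_keys_insert _ _ _ h
      · exact PySem.Dict.nodup_keys_insert _ _ _ h

lemma nodup_keys_buildTW_aux (dic : List (String × Int)) (d : PySem.Dict String Int)
    (h : d.keys.Nodup) :
    (dic.foldl (fun tw wp =>
      (wp.1.toList.foldl
        (fun (st : PySem.Dict String Int × String) x =>
          if (st.1.contains (st.2.push x) : Bool) then
            (st.1.modify (st.2.push x) 0 (· + wp.2), st.2.push x)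
          else
            (st.1.insert (st.2.push x) wp.2, st.2.push x))
        (tw, "")).1) d).keys.Nodup := by
  induction dic generalizing d with
  | nil => exact h
  | cons wp dic ih =>
      rw [List.foldl_cons]
      exact ih _ (nodup_keys_inner wp.2 wp.1.toList (d, "") h)

lemma nodup_keys_buildTotalWeight (dic : List (String × Int)) :
    (buildTotalWeight dic).keys.Nodup :=
  nodup_keys_buildTW_aux dic PySem.Dict.empty PySem.Dict.nodup_keys_empty

-- dedup over append of one element
lemma dedup_append_singleton (xs : List String) (c : String) :
    PySem.List.dedup (xs ++ [c])
      = if c ∈ xs then PySem.List.dedup xs else PySem.List.dedup xs ++ [c] := by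
  have h1 : PySem.List.dedup (xs ++ [c]) = PySem.Set.add (PySem.List.dedup xs) c := by
    simp only [PySem.List.dedup, PySem.Set.ofList_eq_foldl, List.foldl_append, List.foldl_cons,
      List.foldl_nil]
  rw [h1, PySem.Set.add]
  by_cases hm : c ∈ xs
  · rw [if_pos (by simp [PySem.Set.contains, hm]),
      if_pos hm]
  · rw [if_neg (by simp [PySem.Set.contains, hm]),
      if_neg hm]

-- characterization of A's second pass
lemma passA_items (tw : PySem.Dict String Int) (K : List String) :
    (K.foldl
      (fun prop pre =>
        if ¬ (prop.contains (codeWord pre) : Bool)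
            ∨ tw.getD (prop.getD (codeWord pre) "") 0 < tw.getD pre 0 then
          prop.insert (codeWord pre) pre
        else prop)
      PySem.Dict.empty).items
    = (PySem.List.dedup (K.map codeWord)).map
        (fun c => (c, ((bestP c (K.map (fun k => (k, tw.getD k 0))) none).map (·.1)).getD "")) := by
  induction K using List.reverseRecOn with
  | nil => rfl
  | append_singleton K p ih =>
      rw [List.foldl_append, List.foldl_cons, List.foldl_nil]
      have hkeys : (K.foldl
          (fun prop pre =>
            if ¬ (prop.contains (codeWord pre) : Bool)
                ∨ tw.getD (prop.getD (codeWord pre) "") 0 < tw.getD pre 0 then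
              prop.insert (codeWord pre) pre
            else prop)
          PySem.Dict.empty).keys = PySem.List.dedup (K.map codeWord) := by
        unfold PySem.Dict.keys
        rw [ih, List.map_map]
        simp [Function.comp_def]
      have hnd : (K.foldl
          (fun prop pre =>
            if ¬ (prop.contains (codeWord pre) : Bool)
                ∨ tw.getD (prop.getD (codeWord pre) "") 0 < tw.getD pre 0 then
              prop.insert (codeWord pre) pre
            else prop)
          PySem.Dict.empty).keys.Nodup := by
        rw [hkeys]; exact PySem.List.nodup_dedup _
      have hcont : ∀ c', (K.foldl
          (fun prop pre =>
            if ¬ (prop.contains (codeWord pre) : Bool)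
                ∨ tw.getD (prop.getD (codeWord pre) "") 0 < tw.getD pre 0 then
              prop.insert (codeWord pre) pre
            else prop)
          PySem.Dict.empty).contains c' = decide (c' ∈ K.map codeWord) := by
        intro c'
        rw [PySem.Dict.contains_eq_decide_mem_keys, hkeys]
        simp
      rw [show (K ++ [p]).map codeWord = K.map codeWord ++ [codeWord p] by simp,
        show (K ++ [p]).map (fun k => (k, tw.getD k 0))
           = K.map (fun k => (k, tw.getD k 0)) ++ [(p, tw.getD p 0)] by simp,
        dedup_append_singleton]
      simp only [bestP_append]
      by_cases hm : codeWord p ∈ K.map codeWord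
      · -- the code is already present: bestP over K is some q
        rw [if_pos hm]
        obtain ⟨q, hq⟩ := Option.isSome_iff_exists.1
          (bestP_isSome_of_mem (codeWord p) (K.map (fun k => (k, tw.getD k 0)))
            (by rw [List.map_map]; simpa [Function.comp_def] using hm))
        obtain ⟨hqmem, hqcode, hqmax⟩ := bestP_spec _ _ _ hq
        have hq2 : q.2 = tw.getD q.1 0 := by
          obtain ⟨k, hk, he⟩ := List.mem_map.1 hqmem
          rw [← he]
        have hval : (K.foldl
            (fun prop pre =>
              if ¬ (prop.contains (codeWord pre) : Bool)
                  ∨ tw.getD (prop.getD (codeWord pre) "") 0 < tw.getD pre 0 then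
                prop.insert (codeWord pre) pre
              else prop)
            PySem.Dict.empty).getD (codeWord p) "" = q.1 := by
          apply PySem.Dict.getD_of_mem_items _ _ hnd
          rw [ih]
          refine List.mem_map.2 ⟨codeWord p, (PySem.List.mem_dedup _ _).2 hm, ?_⟩
          rw [hq]
          rfl
        by_cases hup : tw.getD q.1 0 < tw.getD p 0
        · -- strict improvement: overwrite in place
          rw [if_pos (Or.inr (by rw [hval]; exact hup)),
            PySem.Dict.items_insert_of_contains _ _ (by rw [hcont]; simp [hm]), ih, List.map_map]
          apply List.map_congr_left
          intro c' hc'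
          by_cases hcc : c' = codeWord p
          · subst hcc
            have hlt : q.2 < tw.getD p 0 := by rw [hq2]; exact hup
            simp [hq, bpStep, hlt]
          · simp [bpStep, hcc, Ne.symm hcc]
        · -- no improvement: dictionary unchanged
          rw [if_neg (by
              rintro (hA | hB)
              · rw [hcont] at hA; simp [hm] at hA
              · rw [hval] at hB; exact hup hB), ih]
          apply List.map_congr_left
          intro c' hc'
          by_cases hcc : c' = codeWord p
          · subst hcc
            have hnlt : ¬ q.2 < tw.getD p 0 := by rw [hq2]; exact hup
            simp [hq, bpStep, hnlt]
          · simp [bpStep, Ne.symm hcc]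
      · -- fresh code: append
        have hbn : bestP (codeWord p) (K.map (fun k => (k, tw.getD k 0))) none = none :=
          bestP_none_of_not_mem _ _ (by rw [List.map_map]; simpa [Function.comp_def] using hm)
        rw [if_pos (Or.inl (by rw [hcont]; simp [hm])),
          PySem.Dict.items_insert_of_not_contains _ _ (by rw [hcont]; simp [hm]),
          if_neg hm, List.map_append, ih]
        congr 1
        · apply List.map_congr_left
          intro c' hc'
          have hcc : c' ≠ codeWord p := fun he => hm (he ▸ (PySem.List.mem_dedup _ _).1 hc')
          simp [bpStep, Ne.symm hcc]
        · simp [hbn, bpStep]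

-- B's per-group max over the filtered pairs IS A's filtered running best
lemma max?_filter_eq_bestP (c : String) (l : List (String × Int)) :
    PySem.List.max? (l.filter (fun pw => codeWord pw.1 == c)) (fun pw => pw.2)
      = bestP c l none := by
  unfold PySem.List.max? bestP
  rw [List.foldl_filter]
  congr 1
  funext acc x
  by_cases hc : codeWord x.1 = c
  · cases acc with
    | none => simp [bpStep, hc]
    | some m => simp [bpStep, hc]
  · simp [bpStep, hc]

-- ===== VERDICT (by name: the statement is the Claim_ definition above) =====
theorem predictive_text_spec : Claim_equal_predictive_text := by
  intro dic _ _
  unfold Spec_predictive_text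
  simp only [predictive_text, predictive_text_alt]
  have hnd := nodup_keys_buildTotalWeight dic
  set tw := buildTotalWeight dic with htw
  rw [passA_items]
  set groups := tw.items.foldl
    (fun (g : PySem.Dict String (List (String × Int))) pw =>
      g.modify (codeWord pw.1) [] (· ++ [pw]))
    PySem.Dict.empty with hg
  have hgnd : groups.keys.Nodup := by
    rw [hg]
    exact PySem.Dict.nodup_keys_foldl_modify_key _ _ _ _ _ PySem.Dict.nodup_keys_empty
  have hgkeys : groups.keys = PySem.List.dedup (tw.keys.map codeWord) := by
    rw [hg, PySem.Dict.keys_foldl_modify_key]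
    have : tw.items.map (fun pw => codeWord pw.1) = tw.keys.map codeWord := by
      simp [PySem.Dict.keys, List.map_map, Function.comp_def]
    simp [PySem.Dict.keys_empty, this, PySem.Set.update_nil_left, PySem.List.dedup]
  have hgetD : ∀ c, groups.getD c []
      = tw.items.filter (fun pw => codeWord pw.1 == c) := by
    intro c
    have hfold : groups = (tw.items.map (fun pw => (codeWord pw.1, pw))).foldl
        (fun (g : PySem.Dict String (List (String × Int))) p =>
          g.modify p.1 [] (· ++ [p.2]))
        PySem.Dict.empty := by
      rw [hg, List.foldl_map]
    rw [hfold, PySem.Dict.getD_foldl_modify_append, PySem.Dict.getD_empty, List.nil_append,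
      List.filter_map]
    simp [List.map_map, Function.comp_def]
  rw [PySem.Dict.items_eq_map_keys groups hgnd [], hgkeys, List.map_map]
  apply List.map_congr_left
  intro c _
  simp only [Function.comp_def]
  rw [hgetD c, PySem.Dict.items_eq_map_keys tw hnd 0, max?_filter_eq_bestP]
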